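-- pv_equiv track=rewrite | github.com/gautam-cloud/Nexwave | release3_searchprogram.py | dev_id_search
-- ===== SOURCE A (Python) =====
-- def dev_id_search(dev_id, dev_list):
--     if dev_id in dev_list:
--         return 'Dev ID Found, Dev ID = ' + str(dev_id) + 'Index =' + str(dev_list.index(dev_id))
--     elif dev_id > max(dev_list):
--         return 'Not Found'
--     else:
--         for i in dev_list:
--             if i > dev_id:
--                 return 'val =' + str(i) + 'index = ' + str(dev_list.index(i))
-- ===== SOURCE B (Python) =====
-- def dev_id_search(dev_id, dev_list):
--     eq_idx = None
--     gt = None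
--     for j, v in enumerate(dev_list):
--         if eq_idx is None and v == dev_id:
--             eq_idx = j
--         if gt is None and v > dev_id:
--             gt = (v, j)
--     if eq_idx is not None:
--         return 'Dev ID Found, Dev ID = ' + str(dev_id) + 'Index =' + str(eq_idx)
--     if gt is None:
--         return 'Not Found'
--     return 'val =' + str(gt[0]) + 'index = ' + str(gt[1])
-- ===== Notes on version B (the rewrite author's own statement) =====
-- stated objective: simpler
-- what changed: One enumerate pass records the first equal index and the first strictly-greater element with its position, replacing A's three separate scans ('in', max(), the for loop) and its two extra list.index scans; the empty list, where A's max([]) raises ValueError, is excluded by Pre_ and B returns 'Not Found' there.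
import Mathlib
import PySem

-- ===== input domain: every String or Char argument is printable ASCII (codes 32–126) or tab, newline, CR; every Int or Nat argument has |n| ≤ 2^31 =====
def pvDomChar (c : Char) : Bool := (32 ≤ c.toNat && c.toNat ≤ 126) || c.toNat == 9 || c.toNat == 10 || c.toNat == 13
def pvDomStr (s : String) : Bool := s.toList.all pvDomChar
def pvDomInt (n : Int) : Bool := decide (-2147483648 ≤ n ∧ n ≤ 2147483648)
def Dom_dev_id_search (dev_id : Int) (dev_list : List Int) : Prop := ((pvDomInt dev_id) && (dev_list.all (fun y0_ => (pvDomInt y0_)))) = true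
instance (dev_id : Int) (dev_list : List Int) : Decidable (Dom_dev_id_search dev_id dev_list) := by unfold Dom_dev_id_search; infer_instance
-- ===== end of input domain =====

-- B replaces A's separate scans (membership test, max(), the search loop and its list.index calls)
-- by one enumerate pass recording the first equal index and the first strictly-greater element; objective: simpler.
-- Pre_ excludes the empty list, where A's max([]) raises ValueError (B returns 'Not Found' there).

-- ===== PORT A =====
-- the 'for i in dev_list: if i > dev_id: return ...' loop of A (dev_list.index(i) → PySem.List.index?)
def pvFindGreater (dev_id : Int) (full : List Int) : List Int → Option String
  | [] => none
  | i :: rest =>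
    if i > dev_id then
      (PySem.List.index? full i).map
        (fun k : Nat => "val =" ++ PySem.Int.toStr i ++ "index = " ++ PySem.Int.toStr (k : Int))
    else pvFindGreater dev_id full rest

def dev_id_search (dev_id : Int) (dev_list : List Int) : Option String :=
  if dev_list.contains dev_id then
    (PySem.List.index? dev_list dev_id).map
      (fun k : Nat => "Dev ID Found, Dev ID = " ++ PySem.Int.toStr dev_id ++ "Index =" ++ PySem.Int.toStr (k : Int))
  else
    match PySem.List.max? dev_list (fun y => y) with
    | none => none   -- max([]) raises ValueError
    | some m =>
      if dev_id > m then some "Not Found"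
      else pvFindGreater dev_id dev_list dev_list

-- ===== PORT B =====
-- B's single enumerate loop: state = (first index with v == dev_id, first (v, j) with v > dev_id)
def pvScan (dev_id : Int) : List Int → Int → Option Int → Option (Int × Int) → Option Int × Option (Int × Int)
  | [], _, e, g => (e, g)
  | v :: rest, j, e, g =>
      pvScan dev_id rest (j + 1)
        (if e = none ∧ v = dev_id then some j else e)
        (if g = none ∧ v > dev_id then some (v, j) else g)

def dev_id_search_alt (dev_id : Int) (dev_list : List Int) : Option String :=
  match pvScan dev_id dev_list 0 none none with
  | (some k, _) => some ("Dev ID Found, Dev ID = " ++ PySem.Int.toStr dev_id ++ "Index =" ++ PySem.Int.toStr k)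
  | (none, none) => some "Not Found"
  | (none, some (v, j)) => some ("val =" ++ PySem.Int.toStr v ++ "index = " ++ PySem.Int.toStr j)

-- ===== PRECONDITION & SPEC =====
-- Pre_ excludes only the empty list: there A's max([]) raises ValueError.
def Pre_dev_id_search (dev_id : Int) (dev_list : List Int) : Prop := dev_list ≠ []
instance (dev_id : Int) (dev_list : List Int) : Decidable (Pre_dev_id_search dev_id dev_list) := by unfold Pre_dev_id_search; infer_instance
def pvWitness_dev_id_search : Int × List Int := (3, [1, 2, 5])

def Spec_dev_id_search (dev_id : Int) (dev_list : List Int) (out : Option String) : Prop := out = dev_id_search_alt dev_id dev_list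
instance (dev_id : Int) (dev_list : List Int) (out : Option String) : Decidable (Spec_dev_id_search dev_id dev_list out) := by unfold Spec_dev_id_search; infer_instance

-- ===== CLAIM (what is proved, stated in full; the proofs are below) =====
def Claim_equal_dev_id_search : Prop := ∀ (dev_id : Int) (dev_list : List Int), Dom_dev_id_search dev_id dev_list → Pre_dev_id_search dev_id dev_list → Spec_dev_id_search dev_id dev_list (dev_id_search dev_id dev_list)

-- ===== LEMMAS AND PROOFS =====

theorem pvScan_fst_some (d : Int) (l : List Int) (j k : Int) (g : Option (Int × Int)) :
    (pvScan d l j (some k) g).1 = some k := by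
  induction l generalizing j g with
  | nil => rfl
  | cons v rest ih => simp [pvScan, ih]

theorem pvScan_snd_some (d : Int) (l : List Int) (j : Int) (e : Option Int) (p : Int × Int) :
    (pvScan d l j e (some p)).2 = some p := by
  induction l generalizing j e with
  | nil => rfl
  | cons v rest ih => simp [pvScan, ih]

theorem pvScan_fst (d : Int) (l : List Int) (j : Int) (g : Option (Int × Int)) :
    (pvScan d l j none g).1 = Option.map (fun k : Nat => (k : Int) + j) (PySem.List.index? l d) := by
  induction l generalizing j g with
  | nil => simp [pvScan, PySem.List.index?_eq_idxOf?, List.idxOf?]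
  | cons v rest ih =>
    by_cases hv : v = d
    · subst hv
      rw [PySem.List.index?_cons_self]
      simp [pvScan, pvScan_fst_some]
    · rw [PySem.List.index?_cons_of_ne rest hv, Option.map_map]
      have hstep : (pvScan d (v :: rest) j none g).1
          = (pvScan d rest (j + 1) none (if g = none ∧ v > d then some (v, j) else g)).1 := by
        simp [pvScan, hv]
      rw [hstep, ih]
      cases PySem.List.index? rest d with
      | none => rfl
      | some k => simp; ring

theorem pvScan_snd_none_iff (d : Int) (l : List Int) (j : Int) (e : Option Int) :
    (pvScan d l j e none).2 = none ↔ ∀ x ∈ l, ¬ x > d := by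
  induction l generalizing j e with
  | nil => simp [pvScan]
  | cons v rest ih =>
    by_cases hv : v > d
    · have hstep : (pvScan d (v :: rest) j e none).2 = some (v, j) := by
        simp [pvScan, hv, pvScan_snd_some]
      rw [hstep]
      simp [hv]
    · have hstep : (pvScan d (v :: rest) j e none).2
          = (pvScan d rest (j + 1) (if e = none ∧ v = d then some j else e) none).2 := by
        simp [pvScan, hv]
      rw [hstep, ih]
      have hv' : v ≤ d := by omega
      simp [hv']

theorem pvIndex?_append_self (v : Int) (pre rest : List Int) (h : v ∉ pre) :
    PySem.List.index? (pre ++ v :: rest) v = some pre.length :=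
  (PySem.List.index?_eq_some_iff _ _ _).mpr ⟨pre, rest, rfl, rfl, h⟩

theorem pvFindGreater_scan (d : Int) (l pre : List Int) (hpre : ∀ x ∈ pre, ¬ x > d)
    (hnm : d ∉ l) :
    pvFindGreater d (pre ++ l) l =
      (match (pvScan d l (pre.length : Int) none none).2 with
       | none => none
       | some (v, j) => some ("val =" ++ PySem.Int.toStr v ++ "index = " ++ PySem.Int.toStr j)) := by
  induction l generalizing pre with
  | nil => rfl
  | cons v rest ih =>
    have hvd : v ≠ d := fun h => hnm (h ▸ List.mem_cons_self)
    by_cases hv : v > d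
    · have hvpre : v ∉ pre := fun h => hpre v h hv
      simp only [pvFindGreater, if_pos hv, pvIndex?_append_self v pre rest hvpre]
      have hstep : (pvScan d (v :: rest) (pre.length : Int) none none).2
          = some (v, (pre.length : Int)) := by
        simp [pvScan, hv, pvScan_snd_some]
      rw [hstep]
      rfl
    · simp only [pvFindGreater, if_neg hv]
      rw [show pre ++ v :: rest = (pre ++ [v]) ++ rest by simp]
      rw [ih (pre ++ [v])
        (by intro x hx
            rcases List.mem_append.mp hx with h | h
            · exact hpre x h
            · simp at h; subst h; exact hv)
        (fun h => hnm (List.mem_cons_of_mem _ h))]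
      rw [show ((pre ++ [v]).length : Int) = (pre.length : Int) + 1 by simp]
      have hstep : (pvScan d (v :: rest) (pre.length : Int) none none).2
          = (pvScan d rest ((pre.length : Int) + 1) none none).2 := by
        simp [pvScan, hv, hvd]
      rw [hstep]

theorem dev_id_search_eq (d : Int) (l : List Int) (hne : l ≠ []) :
    dev_id_search d l = dev_id_search_alt d l := by
  have hfst := pvScan_fst d l 0 none
  unfold dev_id_search dev_id_search_alt
  by_cases hmem : d ∈ l
  · obtain ⟨k, hk⟩ := Option.isSome_iff_exists.mp ((PySem.List.index?_isSome_iff l d).mpr hmem)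
    rw [if_pos (show l.contains d = true by simp [hmem])]
    rw [hk] at hfst ⊢
    rcases hsc : pvScan d l 0 none none with ⟨e, g⟩
    rw [hsc] at hfst
    simp only [Option.map_some] at hfst ⊢
    subst hfst
    simp
  · have hknone : PySem.List.index? l d = none := (PySem.List.index?_eq_none_iff l d).mpr hmem
    rw [hknone, Option.map_none] at hfst
    obtain ⟨m, hm⟩ : ∃ m, PySem.List.max? l (fun y => y) = some m := by
      rcases h : PySem.List.max? l (fun y => y) with _ | m
      · exact absurd ((PySem.List.max?_eq_none_iff l _).mp h) hne
      · exact ⟨m, rfl⟩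
    rw [if_neg (show ¬ l.contains d = true by simp [hmem])]
    simp only [hm]
    by_cases hgt : d > m
    · have hall : ∀ x ∈ l, ¬ x > d := by
        intro x hx
        have := PySem.List.max?_isMax hm x hx
        simp only at this
        omega
      have hsnd := (pvScan_snd_none_iff d l 0 none).mpr hall
      rw [if_pos hgt]
      rcases hsc : pvScan d l 0 none none with ⟨e, g⟩
      rw [hsc] at hfst hsnd
      simp only at hfst hsnd
      subst hfst; subst hsnd
      rfl
    · rw [if_neg hgt]
      have hml := PySem.List.max?_mem hm
      have hmd : m > d := by
        have h1 : m ≠ d := fun h => hmem (h ▸ hml)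
        omega
      have hkey := pvFindGreater_scan d l [] (by simp) hmem
      simp only [List.nil_append, List.length_nil, Nat.cast_zero] at hkey
      rw [hkey]
      have hsnd : (pvScan d l 0 none none).2 ≠ none :=
        fun h => ((pvScan_snd_none_iff d l 0 none).mp h) m hml hmd
      rcases hsc : pvScan d l 0 none none with ⟨e, g⟩
      rw [hsc] at hfst hsnd
      simp only at hfst hsnd
      subst hfst
      rcases g with _ | ⟨v, j⟩
      · exact absurd rfl hsnd
      · rfl

-- ===== VERDICT (by name: the statement is the Claim_ definition above) =====
theorem dev_id_search_spec : Claim_equal_dev_id_search := by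
  intro d l _ hpre
  unfold Spec_dev_id_search
  exact dev_id_search_eq d l hpre
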